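-- pv_equiv track=rewrite | github.com/jaikeex/my-sudoku-game | code/board.py | _find_small_board_by_coordinates
-- ===== SOURCE A (Python) =====
-- def _find_small_board_by_coordinates(coordinates):
--     # Returns sets of coordinates corresponding to a small box
--     # where the argument box is found
--     small_board_index_matrix = [[0, 1, 2],
--                                 [3, 4, 5],
--                                 [6, 7, 8]]
--     small_board_position = []
--     for coordinate in coordinates:
--         for i in small_board_index_matrix:
--             if coordinate in i:
--                 small_board_position.append(i)
--     return small_board_position
-- ===== SOURCE B (Python) =====
-- def _find_small_board_by_coordinates(coordinates):
--     small_board_position = []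
--     for coordinate in coordinates:
--         if coordinate in range(9):
--             r = coordinate // 3
--             small_board_position.append([3 * r, 3 * r + 1, 3 * r + 2])
--     return small_board_position
-- ===== Notes on version B (the rewrite author's own statement) =====
-- stated objective: simpler
-- what changed: Replaces the nested scan over a hard-coded 3x3 index matrix with a single pass that computes each row in closed form as [3*(c//3), 3*(c//3)+1, 3*(c//3)+2] for in-range coordinates.
import Mathlib
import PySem

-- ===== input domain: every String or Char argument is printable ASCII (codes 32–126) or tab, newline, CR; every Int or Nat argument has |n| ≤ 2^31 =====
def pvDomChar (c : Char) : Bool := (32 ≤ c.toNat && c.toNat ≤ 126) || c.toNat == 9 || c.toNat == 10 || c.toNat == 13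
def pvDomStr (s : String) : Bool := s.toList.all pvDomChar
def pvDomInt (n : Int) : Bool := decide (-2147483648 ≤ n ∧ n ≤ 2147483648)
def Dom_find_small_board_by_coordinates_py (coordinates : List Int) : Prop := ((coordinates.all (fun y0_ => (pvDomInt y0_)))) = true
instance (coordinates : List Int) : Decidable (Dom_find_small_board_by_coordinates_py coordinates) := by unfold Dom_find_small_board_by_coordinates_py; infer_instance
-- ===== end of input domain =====

-- B replaces A's inner scan over a hard-coded 3x3 index matrix with a closed-form row
-- computed from coordinate // 3 (objective: simpler; same value on every input).

-- ===== PORT A =====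
-- Literal port of A: nested loop over the hard-coded 3x3 index matrix, appending each matching row.
-- (pvInnerA is A's inner `for i in small_board_index_matrix` loop, factored as a named helper.)
def pvInnerA (acc : List (List Int)) (coordinate : Int) : List (List Int) :=
  ([[0, 1, 2], [3, 4, 5], [6, 7, 8]] : List (List Int)).foldl (fun acc2 i =>
    if coordinate ∈ i then acc2 ++ [i] else acc2) acc

def find_small_board_by_coordinates_py (coordinates : List Int) : List (List Int) :=
  coordinates.foldl pvInnerA []

-- ===== PORT B =====
-- Port of B: single pass, closed-form row from coordinate // 3 for coordinates in range(9).
def find_small_board_by_coordinates_py_alt (coordinates : List Int) : List (List Int) :=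
  coordinates.foldl (fun acc coordinate =>
    if 0 ≤ coordinate ∧ coordinate < 9 then
      let r := PySem.Int.floordiv coordinate 3
      acc ++ [[3 * r, 3 * r + 1, 3 * r + 2]]
    else acc) []

-- ===== PRECONDITION & SPEC =====
def Spec_find_small_board_by_coordinates_py (coordinates : List Int) (out : List (List Int)) : Prop := out = find_small_board_by_coordinates_py_alt coordinates
instance (coordinates : List Int) (out : List (List Int)) : Decidable (Spec_find_small_board_by_coordinates_py coordinates out) := by unfold Spec_find_small_board_by_coordinates_py; infer_instance

-- ===== CLAIM (what is proved, stated in full; the proofs are below) =====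
def Claim_equal_find_small_board_by_coordinates_py : Prop := ∀ (coordinates : List Int), Dom_find_small_board_by_coordinates_py coordinates → Spec_find_small_board_by_coordinates_py coordinates (find_small_board_by_coordinates_py coordinates)

-- ===== LEMMAS AND PROOFS =====

-- The two per-element loop bodies coincide for every coordinate.
lemma pv_step_eq (acc : List (List Int)) (c : Int) :
    pvInnerA acc c =
    (if 0 ≤ c ∧ c < 9 then
      acc ++ [[3 * PySem.Int.floordiv c 3, 3 * PySem.Int.floordiv c 3 + 1,
               3 * PySem.Int.floordiv c 3 + 2]]
     else acc) := by
  unfold pvInnerA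
  by_cases h : 0 ≤ c ∧ c < 9
  · obtain ⟨h1, h2⟩ := h
    interval_cases c <;> simp [List.foldl]
  · have h0 : c < 0 ∨ 9 ≤ c := by omega
    simp only [List.foldl, if_neg h]
    rcases h0 with h0 | h0 <;>
      (rw [if_neg, if_neg, if_neg] <;> simp <;> omega)

lemma pv_fold_eq (coordinates : List Int) (acc : List (List Int)) :
    coordinates.foldl pvInnerA acc =
    coordinates.foldl (fun acc coordinate =>
      if 0 ≤ coordinate ∧ coordinate < 9 then
        acc ++ [[3 * PySem.Int.floordiv coordinate 3,
                 3 * PySem.Int.floordiv coordinate 3 + 1,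
                 3 * PySem.Int.floordiv coordinate 3 + 2]]
      else acc) acc := by
  induction coordinates generalizing acc with
  | nil => rfl
  | cons c cs ih =>
    rw [List.foldl_cons, List.foldl_cons, pv_step_eq]
    exact ih _

-- ===== VERDICT (by name: the statement is the Claim_ definition above) =====
theorem find_small_board_by_coordinates_py_spec : Claim_equal_find_small_board_by_coordinates_py := by
  intro coordinates _
  unfold Spec_find_small_board_by_coordinates_py find_small_board_by_coordinates_py
    find_small_board_by_coordinates_py_alt
  exact pv_fold_eq coordinates []
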